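-- pv_equiv track=rewrite | github.com/leakvoid/leetcode_solutions | 179_largest_number.py | is_bigger
-- ===== SOURCE A (Python) =====
-- def is_bigger(num1, num2):
--     n1_l = 10
--     n1 = num1 // 10
--     while n1:
--         n1 //= 10
--         n1_l *= 10
--
--     n2_l = 10
--     n2 = num2 // 10
--     while n2:
--         n2 //= 10
--         n2_l *= 10
--
--     s1 = num1 * n2_l + num2
--     s2 = num2 * n1_l + num1
--     if s1 == s2:
--         return 0
--     elif s1 > s2:
--         return -1
--     else:
--         return 1
-- ===== SOURCE B (Python) =====
-- def is_bigger(num1, num2):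
--     s1 = str(num1) + str(num2)
--     s2 = str(num2) + str(num1)
--     if s1 == s2:
--         return 0
--     if s1 > s2:
--         return -1
--     return 1
-- ===== Notes on version B (the rewrite author's own statement) =====
-- stated objective: idiomatic
-- what changed: B replaces the two digit-counting while-loops and 10^digits integer multipliers by direct lexicographic comparison of the two string concatenations str(num1)+str(num2) vs str(num2)+str(num1); Pre_ excludes negative inputs, on which A's while loop never terminates (num // 10 stays -1).
import Mathlib
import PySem

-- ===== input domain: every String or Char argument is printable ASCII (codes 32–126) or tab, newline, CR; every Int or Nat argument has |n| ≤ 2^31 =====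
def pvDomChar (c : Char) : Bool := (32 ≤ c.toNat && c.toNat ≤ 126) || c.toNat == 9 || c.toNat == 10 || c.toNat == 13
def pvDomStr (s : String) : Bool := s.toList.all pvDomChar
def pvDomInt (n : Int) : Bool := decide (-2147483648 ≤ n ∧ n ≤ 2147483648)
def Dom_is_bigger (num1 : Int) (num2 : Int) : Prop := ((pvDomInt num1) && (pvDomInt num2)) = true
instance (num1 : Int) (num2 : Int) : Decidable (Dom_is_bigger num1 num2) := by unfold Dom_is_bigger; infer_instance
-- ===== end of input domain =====

-- B replaces A's two digit-counting while-loops and 10^digits multipliers by direct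
-- lexicographic comparison of the two string concatenations (idiomatic; same asymptotic cost).


-- ===== PORT A =====
-- the two identical 'while n: n //= 10; l *= 10' loops; fuel 64 only makes the
-- recursion total (64 iterations never run out inside Dom: |num| ≤ 2^31)
def pyLenLoop : Nat → Int → Int → Int
  | 0, _, l => l
  | f+1, n, l => if n ≠ 0 then pyLenLoop f (PySem.Int.floordiv n 10) (l * 10) else l

def is_bigger (num1 : Int) (num2 : Int) : Int :=
  let n1_l := pyLenLoop 64 (PySem.Int.floordiv num1 10) 10
  let n2_l := pyLenLoop 64 (PySem.Int.floordiv num2 10) 10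
  let s1 := num1 * n2_l + num2
  let s2 := num2 * n1_l + num1
  if s1 = s2 then 0
  else if s1 > s2 then -1
  else 1

-- ===== PORT B =====
def is_bigger_alt (num1 : Int) (num2 : Int) : Int :=
  let s1 := PySem.Int.toStr num1 ++ PySem.Int.toStr num2
  let s2 := PySem.Int.toStr num2 ++ PySem.Int.toStr num1
  if s1 = s2 then 0
  else if s1 > s2 then -1
  else 1

-- ===== PRECONDITION & SPEC =====
-- Pre_ excludes negative inputs: there A never returns (its 'while n1:' loop runs forever,
-- since num // 10 of a negative number never reaches 0 under Python's floor division).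
def Pre_is_bigger (num1 : Int) (num2 : Int) : Prop := 0 ≤ num1 ∧ 0 ≤ num2
instance (num1 : Int) (num2 : Int) : Decidable (Pre_is_bigger num1 num2) := by unfold Pre_is_bigger; infer_instance
def pvWitness_is_bigger : Int × Int := (12, 3)

def Spec_is_bigger (num1 : Int) (num2 : Int) (out : Int) : Prop := out = is_bigger_alt num1 num2
instance (num1 : Int) (num2 : Int) (out : Int) : Decidable (Spec_is_bigger num1 num2 out) := by unfold Spec_is_bigger; infer_instance

-- ===== CLAIM (what is proved, stated in full; the proofs are below) =====
def Claim_equal_is_bigger : Prop := ∀ (num1 : Int) (num2 : Int), Dom_is_bigger num1 num2 → Pre_is_bigger num1 num2 → Spec_is_bigger num1 num2 (is_bigger num1 num2)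

-- ===== LEMMAS AND PROOFS =====

-- the decimal digit list of a natural number, most significant first
def DL (n : Nat) : List Nat :=
  if _h : n < 10 then [n] else DL (n / 10) ++ [n % 10]
  decreasing_by exact Nat.div_lt_self (by omega) (by norm_num)

-- the numeric value of a digit list
def dval (l : List Nat) : Nat := l.foldl (fun a d => a * 10 + d) 0

-- number of //10 steps to reach 0
def stepE (n : Nat) : Nat :=
  if _h : n = 0 then 0 else stepE (n / 10) + 1
  decreasing_by exact Nat.div_lt_self (by omega) (by norm_num)

theorem foldl_shift (l : List Nat) (a : Nat) :
    l.foldl (fun a d => a * 10 + d) a = a * 10 ^ l.length + l.foldl (fun a d => a * 10 + d) 0 := by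
  induction l generalizing a with
  | nil => simp
  | cons x xs ih =>
    simp only [List.foldl_cons, List.length_cons]
    rw [ih (a * 10 + x), ih (0 * 10 + x)]
    ring

theorem dval_cons (x : Nat) (xs : List Nat) :
    dval (x :: xs) = x * 10 ^ xs.length + dval xs := by
  simp only [dval, List.foldl_cons]
  rw [foldl_shift xs (0 * 10 + x)]
  ring

theorem dval_append (xs ys : List Nat) :
    dval (xs ++ ys) = dval xs * 10 ^ ys.length + dval ys := by
  simp only [dval, List.foldl_append]
  rw [foldl_shift ys]

theorem dval_DL (n : Nat) : dval (DL n) = n := by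
  fun_induction DL n with
  | case1 n h => simp [dval]
  | case2 n h ih => rw [dval_append, ih]; simp [dval]; omega

theorem DL_lt (n : Nat) : ∀ x ∈ DL n, x < 10 := by
  fun_induction DL n with
  | case1 n h => intro x hx; simp at hx; omega
  | case2 n h ih =>
    intro x hx
    rw [List.mem_append] at hx
    rcases hx with hx | hx
    · exact ih x hx
    · simp at hx; omega

theorem DL_length (n : Nat) : (DL n).length = stepE (n / 10) + 1 := by
  fun_induction DL n with
  | case1 n h =>
    rw [Nat.div_eq_of_lt h]
    simp [stepE]
  | case2 n h ih =>
    have h10 : n / 10 ≠ 0 := by omega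
    rw [List.length_append, ih]
    conv_rhs => rw [stepE, dif_neg h10]
    rw [Nat.div_div_eq_div_mul]
    simp

theorem dval_lt_pow (l : List Nat) (h : ∀ x ∈ l, x < 10) : dval l < 10 ^ l.length := by
  induction l with
  | nil => simp [dval]
  | cons x xs ih =>
    have hx : x < 10 := h x (by simp)
    have hxs := ih (fun y hy => h y (by simp [hy]))
    rw [dval_cons, List.length_cons, pow_succ]
    have hmul : x * 10 ^ xs.length ≤ 9 * 10 ^ xs.length :=
      Nat.mul_le_mul_right _ (by omega)
    omega

-- the loop computes 10^(number of //10 steps) times the accumulator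
theorem pyLenLoop_spec (f : Nat) (m : Nat) (l : Int) (hm : m < 10 ^ f) :
    pyLenLoop f (m : Int) l = l * 10 ^ stepE m := by
  induction f generalizing m l with
  | zero =>
    have : m = 0 := by simpa using hm
    subst this
    simp [pyLenLoop, stepE]
  | succ f ih =>
    by_cases h0 : m = 0
    · subst h0; simp [pyLenLoop, stepE]
    · have hcast : (m : Int) ≠ 0 := by exact_mod_cast h0
      rw [pyLenLoop, if_pos hcast]
      rw [show PySem.Int.floordiv (m : Int) 10 = ((m / 10 : Nat) : Int) from
        PySem.Int.floordiv_natCast m 10]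
      rw [ih (m / 10) (l * 10) ((Nat.div_lt_iff_lt_mul (by norm_num)).mpr
        (by rw [← pow_succ]; exact hm))]
      conv_rhs => rw [stepE, dif_neg h0]
      rw [pow_succ]
      ring

theorem lenLoop_eq (num : Int) (h0 : 0 ≤ num) (hb : num ≤ 2147483648) :
    pyLenLoop 64 (PySem.Int.floordiv num 10) 10 = (10 : Int) ^ (DL num.toNat).length := by
  have hnum : num = (num.toNat : Int) := by omega
  conv_lhs => rw [hnum]
  rw [show PySem.Int.floordiv ((num.toNat : Nat) : Int) 10 = ((num.toNat / 10 : Nat) : Int) from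
    PySem.Int.floordiv_natCast num.toNat 10]
  rw [pyLenLoop_spec 64 (num.toNat / 10) 10 (by
    have h1 : num.toNat ≤ 2147483648 := by omega
    have h64 : (2147483648 : Nat) < 10 ^ 64 := by norm_num
    omega)]
  rw [DL_length, pow_succ]
  ring

-- Nat.toDigitsCore: the accumulator is just appended
theorem toDigitsCore_acc (f : Nat) : ∀ (n : Nat) (acc : List Char),
    Nat.toDigitsCore 10 f n acc = Nat.toDigitsCore 10 f n [] ++ acc := by
  induction f with
  | zero => intro n acc; simp [Nat.toDigitsCore]
  | succ f ih =>
    intro n acc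
    simp only [Nat.toDigitsCore]
    by_cases h : n / 10 = 0
    · simp [h]
    · rw [if_neg h, if_neg h, ih (n / 10) [(n % 10).digitChar],
        ih (n / 10) ((n % 10).digitChar :: acc)]
      simp

theorem toDigitsCore_eq_DL (n : Nat) : ∀ (f : Nat), n < f →
    Nat.toDigitsCore 10 f n [] = (DL n).map Nat.digitChar := by
  induction n using Nat.strong_induction_on with
  | _ n ihn =>
    intro f hf
    match f with
    | f + 1 =>
      simp only [Nat.toDigitsCore]
      by_cases h : n / 10 = 0
      · have hn : n < 10 := by omega
        rw [if_pos h, DL, dif_pos hn, Nat.mod_eq_of_lt hn]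
        simp
      · have hn : ¬ n < 10 := by omega
        rw [if_neg h, toDigitsCore_acc, ihn (n / 10)
          (Nat.div_lt_self (by omega) (by norm_num)) f
          (by have := Nat.div_lt_self (show 0 < n by omega) (show 1 < 10 by norm_num); omega)]
        conv_rhs => rw [DL, dif_neg hn]
        simp

theorem toChars_eq_DL (num : Int) (h0 : 0 ≤ num) :
    PySem.Int.toChars num = (DL num.toNat).map Nat.digitChar := by
  rw [PySem.Int.toChars, if_neg (by omega)]
  exact toDigitsCore_eq_DL num.toNat (num.toNat + 1) (by omega)

-- digitChar is a strict-order embedding on digits (finite check)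
theorem digitChar_lt_iff : ∀ a, a < 10 → ∀ b, b < 10 →
    (Nat.digitChar a < Nat.digitChar b ↔ a < b) := by decide

theorem digitChar_inj : ∀ a, a < 10 → ∀ b, b < 10 →
    (Nat.digitChar a = Nat.digitChar b ↔ a = b) := by decide

theorem lex_cons_cases {α : Type} {r : α → α → Prop} {a b : α} {l m : List α}
    (h : List.Lex r (a :: l) (b :: m)) : r a b ∨ (a = b ∧ List.Lex r l m) := by
  cases h with
  | rel h => exact Or.inl h
  | cons h => exact Or.inr ⟨rfl, h⟩

-- equal-length digit lists: lexicographic order = numeric order, equality = value equality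
theorem cmp_lists (xs : List Nat) : ∀ (ys : List Nat), xs.length = ys.length →
    (∀ x ∈ xs, x < 10) → (∀ y ∈ ys, y < 10) →
    ((xs.map Nat.digitChar = ys.map Nat.digitChar ↔ dval xs = dval ys) ∧
     (List.Lex (· < ·) (xs.map Nat.digitChar) (ys.map Nat.digitChar) ↔ dval xs < dval ys)) := by
  induction xs with
  | nil =>
    intro ys hlen _ _
    have : ys = [] := List.length_eq_zero_iff.mp hlen.symm
    subst this
    constructor
    · simp
    · constructor
      · intro h; cases h
      · intro h; simp at h
  | cons x xs ih =>
    intro ys hlen hxlt hylt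
    match ys with
    | y :: ys =>
      have hlen2 : xs.length = ys.length := by simpa using hlen
      have hx : x < 10 := hxlt x (by simp)
      have hy : y < 10 := hylt y (by simp)
      have hxs : ∀ a ∈ xs, a < 10 := fun a ha => hxlt a (by simp [ha])
      have hys : ∀ a ∈ ys, a < 10 := fun a ha => hylt a (by simp [ha])
      obtain ⟨iheq, ihlt⟩ := ih ys hlen2 hxs hys
      have hvx : dval xs < 10 ^ xs.length := dval_lt_pow xs hxs
      have hvy : dval ys < 10 ^ ys.length := dval_lt_pow ys hys
      have hP : 0 < 10 ^ ys.length := pow_pos (by norm_num) _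
      have hmulx : x < y → x * 10 ^ ys.length + 10 ^ ys.length ≤ y * 10 ^ ys.length := by
        intro hc
        calc x * 10 ^ ys.length + 10 ^ ys.length = (x + 1) * 10 ^ ys.length := by ring
        _ ≤ y * 10 ^ ys.length := Nat.mul_le_mul_right _ (by omega)
      have hmuly : y < x → y * 10 ^ ys.length + 10 ^ ys.length ≤ x * 10 ^ ys.length := by
        intro hc
        calc y * 10 ^ ys.length + 10 ^ ys.length = (y + 1) * 10 ^ ys.length := by ring
        _ ≤ x * 10 ^ ys.length := Nat.mul_le_mul_right _ (by omega)
      rw [dval_cons, dval_cons, hlen2]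
      rw [hlen2] at hvx
      constructor
      · constructor
        · intro h
          simp only [List.map_cons, List.cons.injEq] at h
          rw [(digitChar_inj x hx y hy).mp h.1, iheq.mp h.2]
        · intro h
          have hxy : x = y := by
            rcases Nat.lt_trichotomy x y with hc | hc | hc
            · have := hmulx hc; omega
            · exact hc
            · have := hmuly hc; omega
          subst hxy
          have hvv : dval xs = dval ys := by omega
          simp only [List.map_cons]
          rw [iheq.mpr hvv]
      · constructor
        · intro h
          simp only [List.map_cons] at h
          rcases lex_cons_cases h with hr | ⟨heq, ht⟩
          · have hc : x < y := (digitChar_lt_iff x hx y hy).mp hr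
            have := hmulx hc; omega
          · have hxy : x = y := (digitChar_inj x hx y hy).mp heq
            subst hxy
            have := ihlt.mp ht
            omega
        · intro h
          simp only [List.map_cons]
          rcases Nat.lt_trichotomy x y with hc | hc | hc
          · exact List.Lex.rel ((digitChar_lt_iff x hx y hy).mpr hc)
          · subst hc
            have hvv : dval xs < dval ys := by omega
            exact List.Lex.cons (ihlt.mpr hvv)
          · have := hmuly hc; omega

-- ===== VERDICT (by name: the statement is the Claim_ definition above) =====
theorem is_bigger_spec : Claim_equal_is_bigger := by
  intro num1 num2 hdom hpre
  obtain ⟨h1, h2⟩ := hpre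
  simp only [Dom_is_bigger, pvDomInt, Bool.and_eq_true, decide_eq_true_eq] at hdom
  obtain ⟨⟨-, hb1⟩, -, hb2⟩ := hdom
  have hA1 := lenLoop_eq num1 h1 hb1
  have hA2 := lenLoop_eq num2 h2 hb2
  lift num1 to ℕ using h1 with a
  lift num2 to ℕ using h2 with b
  simp only [Int.toNat_natCast] at hA1 hA2
  have hlab : (DL a ++ DL b).length = (DL b ++ DL a).length := by
    simp [List.length_append]; omega
  have hd1 : ∀ x ∈ DL a ++ DL b, x < 10 := by
    intro x hx
    rcases List.mem_append.mp hx with h | h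
    exacts [DL_lt a x h, DL_lt b x h]
  have hd2 : ∀ x ∈ DL b ++ DL a, x < 10 := by
    intro x hx
    rcases List.mem_append.mp hx with h | h
    exacts [DL_lt b x h, DL_lt a x h]
  obtain ⟨heq, -⟩ := cmp_lists (DL a ++ DL b) (DL b ++ DL a) hlab hd1 hd2
  obtain ⟨-, hlt⟩ := cmp_lists (DL b ++ DL a) (DL a ++ DL b) hlab.symm hd2 hd1
  have hv1 : dval (DL a ++ DL b) = a * 10 ^ (DL b).length + b := by
    rw [dval_append, dval_DL, dval_DL]
  have hv2 : dval (DL b ++ DL a) = b * 10 ^ (DL a).length + a := by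
    rw [dval_append, dval_DL, dval_DL]
  have hmaps1 : (PySem.Int.toStr (a : Int) ++ PySem.Int.toStr (b : Int)).toList
      = (DL a ++ DL b).map Nat.digitChar := by
    simp only [String.toList_append, PySem.Int.toList_toStr,
      toChars_eq_DL (a : Int) (by omega), toChars_eq_DL (b : Int) (by omega),
      Int.toNat_natCast, List.map_append]
  have hmaps2 : (PySem.Int.toStr (b : Int) ++ PySem.Int.toStr (a : Int)).toList
      = (DL b ++ DL a).map Nat.digitChar := by
    simp only [String.toList_append, PySem.Int.toList_toStr,
      toChars_eq_DL (a : Int) (by omega), toChars_eq_DL (b : Int) (by omega),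
      Int.toNat_natCast, List.map_append]
  -- B's two string conditions, read off as conditions on the digit values
  have hbeq : (PySem.Int.toStr (a : Int) ++ PySem.Int.toStr (b : Int)
      = PySem.Int.toStr (b : Int) ++ PySem.Int.toStr (a : Int))
      ↔ dval (DL a ++ DL b) = dval (DL b ++ DL a) := by
    rw [← String.toList_inj, hmaps1, hmaps2]; exact heq
  have hblt : (PySem.Int.toStr (b : Int) ++ PySem.Int.toStr (a : Int)
      < PySem.Int.toStr (a : Int) ++ PySem.Int.toStr (b : Int))
      ↔ dval (DL b ++ DL a) < dval (DL a ++ DL b) := by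
    rw [String.lt_iff_toList_lt, hmaps1, hmaps2]
    exact hlt
  -- A's two integer conditions are the same conditions on the digit values
  have hs1 : (a : Int) * pyLenLoop 64 (PySem.Int.floordiv (b : Int) 10) 10 + (b : Int)
      = ((dval (DL a ++ DL b) : Nat) : Int) := by
    rw [hA2, hv1]; push_cast; ring
  have hs2 : (b : Int) * pyLenLoop 64 (PySem.Int.floordiv (a : Int) 10) 10 + (a : Int)
      = ((dval (DL b ++ DL a) : Nat) : Int) := by
    rw [hA1, hv2]; push_cast; ring
  show is_bigger (a : Int) (b : Int) = is_bigger_alt (a : Int) (b : Int)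
  simp only [is_bigger, is_bigger_alt, hs1, hs2, gt_iff_lt, Nat.cast_inj, Nat.cast_lt,
    hbeq, hblt]
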